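-- pv_equiv track=rewrite | github.com/NickOneRG/LeetCode | Yandex_Job/Problem-D.py | final_position
-- ===== SOURCE A (Python) =====
-- def final_position(commands):
--     position = 0
--     direction = 0  # 0: right, 1: down, 2: left, 3: up
--     for command in commands:
--         if command == 'F':
--             if direction == 0:  # right
--                 position += 1
--             elif direction == 2:  # left
--                 position -= 1
--         elif command == 'R':
--             direction = (direction + 1) % 4
--         elif command == 'L':
--             direction = (direction - 1) % 4
--     return position
-- ===== SOURCE B (Python) =====
-- def final_position(commands):
--     # Pass 1: net quarter-turns (R=+1, L=-1) accumulated BEFORE each command.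
--     turns = []
--     t = 0
--     for c in commands:
--         turns.append(t)
--         t += (c == 'R') - (c == 'L')
--     # Pass 2: each 'F' contributes via a sign table indexed by heading mod 4
--     # (east -> +1, west -> -1, north/south -> 0).
--     return sum((1, 0, -1, 0)[t % 4] for t, c in zip(turns, commands) if c == 'F')
-- ===== Notes on version B (the rewrite author's own statement) =====
-- stated objective: alternative
-- what changed: Replaces the single-pass direction-state simulation by two staged passes: first a prefix-sum of net quarter-turns before each command, then a comprehension summing each 'F' contribution looked up in a sign table indexed by that prefix turn count mod 4.
import Mathlib
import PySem

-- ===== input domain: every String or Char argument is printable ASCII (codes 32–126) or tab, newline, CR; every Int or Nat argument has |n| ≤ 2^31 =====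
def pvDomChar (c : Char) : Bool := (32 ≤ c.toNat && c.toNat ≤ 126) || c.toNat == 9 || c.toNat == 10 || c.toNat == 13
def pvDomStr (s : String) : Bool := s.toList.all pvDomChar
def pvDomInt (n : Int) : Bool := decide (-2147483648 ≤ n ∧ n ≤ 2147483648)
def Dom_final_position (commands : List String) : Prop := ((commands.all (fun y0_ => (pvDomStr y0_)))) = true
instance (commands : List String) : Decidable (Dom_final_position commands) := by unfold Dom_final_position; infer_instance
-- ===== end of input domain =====

-- B replaces A's single-pass direction-state simulation by two staged passes: a prefix-sum of
-- net quarter-turns, then a sign-table lookup summed over the 'F' commands. Alternative, same O(n).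

-- ===== PORT A =====
-- state: (position, direction)
def finalPosStepA (s : Int × Int) (command : String) : Int × Int :=
  if command = "F" then
    if s.2 = 0 then (s.1 + 1, s.2)
    else if s.2 = 2 then (s.1 - 1, s.2)
    else s
  else if command = "R" then (s.1, PySem.Int.mod (s.2 + 1) 4)
  else if command = "L" then (s.1, PySem.Int.mod (s.2 - 1) 4)
  else s

def final_position (commands : List String) : Int :=
  (commands.foldl finalPosStepA (0, 0)).1

-- ===== PORT B =====
-- (c == 'R') - (c == 'L')
def turnDelta (c : String) : Int :=
  (if c = "R" then 1 else 0) - (if c = "L" then 1 else 0)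

-- (1, 0, -1, 0)[t % 4]  (index is 0..3, always in range, so plain getD is exact here)
def signOf (t : Int) : Int :=
  ([1, 0, -1, 0] : List Int).getD (PySem.Int.mod t 4).toNat 0

def final_position_alt (commands : List String) : Int :=
  -- Pass 1: turns = list of net quarter-turns before each command
  let p := commands.foldl (fun acc c => (acc.1 ++ [acc.2], acc.2 + turnDelta c))
            (([] : List Int), (0 : Int))
  -- Pass 2: sum the sign-table contributions of the 'F' commands
  ((((p.1.zip commands).filter (fun q => q.2 == "F")).map (fun q => signOf q.1)).sum)

-- ===== PRECONDITION & SPEC =====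
def Spec_final_position (commands : List String) (out : Int) : Prop := out = final_position_alt commands
instance (commands : List String) (out : Int) : Decidable (Spec_final_position commands out) := by unfold Spec_final_position; infer_instance

-- ===== CLAIM =====
def Claim_equal_final_position : Prop := ∀ (commands : List String), Dom_final_position commands → Spec_final_position commands (final_position commands)

-- ===== LEMMAS AND PROOFS =====
-- the turns produced by pass 1 starting from running turn count t
def turnsAux : List String → Int → List Int
  | [], _ => []
  | c :: cs, t => t :: turnsAux cs (t + turnDelta c)

-- reference function: contribution of the commands given the turn count before them
def gRef : List String → Int → Int
  | [], _ => 0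
  | c :: cs, t => (if c = "F" then signOf t else 0) + gRef cs (t + turnDelta c)

theorem pass1_eq (cs : List String) : ∀ (acc : List Int) (t : Int),
    (cs.foldl (fun acc c => (acc.1 ++ [acc.2], acc.2 + turnDelta c)) (acc, t)).1
      = acc ++ turnsAux cs t := by
  induction cs with
  | nil => intro acc t; simp [turnsAux]
  | cons c cs ih =>
    intro acc t
    simp only [List.foldl_cons, turnsAux]
    rw [ih]
    simp

theorem pass2_eq (cs : List String) : ∀ (t : Int),
    ((((turnsAux cs t).zip cs).filter (fun q => q.2 == "F")).map (fun q => signOf q.1)).sum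
      = gRef cs t := by
  induction cs with
  | nil => intro t; simp [turnsAux, gRef]
  | cons c cs ih =>
    intro t
    simp only [turnsAux, gRef, List.zip_cons_cons, List.filter_cons]
    by_cases h : c = "F" <;> simp [h, ih]

theorem A_eq_gRef (cs : List String) : ∀ (p t : Int),
    (cs.foldl finalPosStepA (p, PySem.Int.mod t 4)).1 = p + gRef cs t := by
  induction cs with
  | nil => intro p t; simp [gRef]
  | cons c cs ih =>
    intro p t
    have hm : PySem.Int.mod t 4 = t % 4 := PySem.Int.mod_eq_emod_of_pos (by norm_num)
    simp only [List.foldl_cons, gRef]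
    by_cases hF : c = "F"
    · subst hF
      have hb0 : 0 ≤ t % 4 := Int.emod_nonneg t (by norm_num)
      have hb1 : t % 4 < 4 := Int.emod_lt_of_pos t (by norm_num)
      have hd : turnDelta "F" = 0 := by decide
      by_cases h0 : t % 4 = 0
      · have hstep : finalPosStepA (p, PySem.Int.mod t 4) "F" = (p + 1, PySem.Int.mod t 4) := by
          simp [finalPosStepA, h0]
        rw [hstep, ih (p + 1) t]
        have hs1 : signOf t = 1 := by unfold signOf; rw [hm, h0]; rfl
        rw [hs1, hd]; simp; try ring
      · by_cases h2 : t % 4 = 2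
        · have hstep : finalPosStepA (p, PySem.Int.mod t 4) "F" = (p - 1, PySem.Int.mod t 4) := by
            simp [finalPosStepA, h2]
          rw [hstep, ih (p - 1) t]
          have hs1 : signOf t = -1 := by unfold signOf; rw [hm, h2]; rfl
          rw [hs1, hd]; simp; try ring
        · have hstep : finalPosStepA (p, PySem.Int.mod t 4) "F" = (p, PySem.Int.mod t 4) := by
            simp [finalPosStepA, h0, h2]
          rw [hstep, ih p t]
          have hs1 : signOf t = 0 := by
            unfold signOf; rw [hm]
            interval_cases h : (t % 4) <;> simp_all
          rw [hs1, hd]; simp; try ring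
    · by_cases hR : c = "R"
      · subst hR
        simp only [finalPosStepA, if_neg (by decide : ¬("R" : String) = "F")]
        have hmod : PySem.Int.mod (PySem.Int.mod t 4 + 1) 4 = PySem.Int.mod (t + 1) 4 := by
          rw [hm, PySem.Int.mod_eq_emod_of_pos (by norm_num),
              PySem.Int.mod_eq_emod_of_pos (by norm_num)]
          omega
        rw [hmod]
        have := ih p (t + 1)
        simp_all [turnDelta]
      · by_cases hL : c = "L"
        · subst hL
          simp only [finalPosStepA, if_neg (by decide : ¬("L" : String) = "F"),
            if_neg (by decide : ¬("L" : String) = "R")]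
          have hmod : PySem.Int.mod (PySem.Int.mod t 4 - 1) 4 = PySem.Int.mod (t - 1) 4 := by
            rw [hm, PySem.Int.mod_eq_emod_of_pos (by norm_num),
                PySem.Int.mod_eq_emod_of_pos (by norm_num)]
            omega
          rw [hmod]
          have := ih p (t - 1)
          simp_all [turnDelta, sub_eq_add_neg]
        · simp only [finalPosStepA, if_neg hF, if_neg hR, if_neg hL]
          have := ih p t
          simp_all [turnDelta]

-- ===== VERDICT =====
theorem final_position_spec : Claim_equal_final_position := by
  intro commands _
  unfold Spec_final_position final_position final_position_alt
  have hA : (commands.foldl finalPosStepA (0, PySem.Int.mod 0 4)).1 = 0 + gRef commands 0 :=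
    A_eq_gRef commands 0 0
  have hmod0 : PySem.Int.mod 0 4 = 0 := by decide
  rw [hmod0] at hA
  rw [hA]
  simp only []
  rw [pass1_eq commands [] 0]
  rw [List.nil_append, pass2_eq commands 0]
  ring
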